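-- pv_equiv track=rewrite | github.com/MrBrantCode/unitest_baseline | mut_generate/mist_train_cf/cf_96402/solution.py | delete_chars
-- ===== SOURCE A (Python) =====
-- def delete_chars(A, B):
--     # Convert A and B into lists to make modifications easier
--     A = list(A)
--     B = list(B)
--
--     # Initialize a pointer to keep track of the current position in A
--     i = 0
--
--     # Iterate through each character in A
--     while i < len(A):
--         # Check if the character is in B or if it appears more than once consecutively
--         if A[i] in B or (i > 0 and A[i] == A[i-1]):
--             # Delete the character from A
--             del A[i]
--         else:
--             # Move to the next character in A
--             i += 1
--
--     # Convert A back into a string and return it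
--     return ''.join(A)
-- ===== SOURCE B (Python) =====
-- def delete_chars(A, B):
--     banned = set(B)
--     res = []
--     for c in A:
--         if c not in banned and (not res or res[-1] != c):
--             res.append(c)
--     return ''.join(res)
-- ===== Notes on version B (the rewrite author's own statement) =====
-- stated objective: faster
-- what changed: Replaces the quadratic delete-in-place while loop (with 'c in B' list scans) by a single forward pass that keeps a character iff it is not in set(B) and differs from the last kept character.
import Mathlib
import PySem

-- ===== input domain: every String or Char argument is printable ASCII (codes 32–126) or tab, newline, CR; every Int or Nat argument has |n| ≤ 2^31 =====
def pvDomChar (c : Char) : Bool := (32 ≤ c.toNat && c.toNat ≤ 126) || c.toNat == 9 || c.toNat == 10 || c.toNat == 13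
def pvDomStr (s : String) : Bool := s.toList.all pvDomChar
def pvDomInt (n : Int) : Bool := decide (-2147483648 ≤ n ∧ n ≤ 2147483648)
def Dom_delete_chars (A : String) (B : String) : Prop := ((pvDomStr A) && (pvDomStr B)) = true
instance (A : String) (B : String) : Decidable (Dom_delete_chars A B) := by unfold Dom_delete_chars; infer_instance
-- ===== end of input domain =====

-- B replaces A's quadratic delete-in-place while loop by a single forward pass
-- keeping a char iff it is not in set(B) and differs from the last kept char (faster).

-- ===== PORT A =====
-- the while loop of A: state = current list A and index i; 'del A[i]' = eraseIdx
def delete_chars_loop (B : List Char) (A : List Char) (i : Nat) : List Char :=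
  if h : i < A.length then
    if A.getD i ' ' ∈ B ∨ (0 < i ∧ A.getD i ' ' = A.getD (i - 1) ' ') then
      delete_chars_loop B (A.eraseIdx i) i
    else
      delete_chars_loop B A (i + 1)
  else A
termination_by A.length - i
decreasing_by
  · simp only [List.length_eraseIdx, h, if_pos]; omega
  · omega

def delete_chars (A : String) (B : String) : String :=
  String.mk (delete_chars_loop B.toList A.toList 0)

-- ===== PORT B =====
def delete_chars_alt (A : String) (B : String) : String :=
  let banned : PySem.Set Char := PySem.Set.ofList B.toList
  let res := A.toList.foldl
    (fun res c =>
      if ¬ PySem.Set.contains banned c ∧ (res = [] ∨ res.getLast? ≠ some c) then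
        res ++ [c]
      else res) []
  String.mk res

-- ===== PRECONDITION & SPEC =====
def Spec_delete_chars (A : String) (B : String) (out : String) : Prop := out = delete_chars_alt A B
instance (A : String) (B : String) (out : String) : Decidable (Spec_delete_chars A B out) := by unfold Spec_delete_chars; infer_instance

-- ===== CLAIM (what is proved, stated in full; the proofs are below) =====
def Claim_equal_delete_chars : Prop := ∀ (A : String) (B : String), Dom_delete_chars A B → Spec_delete_chars A B (delete_chars A B)

-- ===== LEMMAS AND PROOFS =====

-- 'del A[i]' at the boundary between the kept prefix and the unprocessed suffix
lemma erase_mid (res : List Char) (c : Char) (rest : List Char) :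
    (res ++ c :: rest).eraseIdx res.length = res ++ rest := by
  induction res with
  | nil => simp
  | cons x xs ih => simp [ih]

lemma getD_mid (res : List Char) (c : Char) (rest : List Char) :
    (res ++ c :: rest).getD res.length ' ' = c := by
  simp

lemma getD_prev (res : List Char) (c : Char) (rest : List Char) (h : res ≠ []) :
    (res ++ c :: rest).getD (res.length - 1) ' ' = (res.getLast?).getD ' ' := by
  have hl : 0 < res.length := List.length_pos_iff.mpr h
  have hlt : res.length - 1 < res.length := by omega
  simp [List.getD, List.getElem?_append_left hlt, List.getLast?_eq_getElem?]

-- invariant: at state (res ++ rest, i = |res|) the A-loop computes B's fold over rest from res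
lemma loop_eq (B : List Char) : ∀ (rest res : List Char),
    delete_chars_loop B (res ++ rest) res.length =
    rest.foldl (fun r c =>
      if ¬ PySem.Set.contains (PySem.Set.ofList B) c ∧ (r = [] ∨ r.getLast? ≠ some c) then
        r ++ [c]
      else r) res := by
  intro rest
  induction rest with
  | nil =>
    intro res
    rw [delete_chars_loop]
    simp
  | cons c rest ih =>
    intro res
    rw [delete_chars_loop]
    have hlen : res.length < (res ++ c :: rest).length := by simp
    rw [dif_pos hlen, getD_mid]
    by_cases hres : res = []
    · subst hres
      by_cases hB : c ∈ B
      · rw [if_pos (Or.inl hB)]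
        have h0 := ih ([] : List Char)
        simp only [List.nil_append, List.length_nil] at h0
        simpa [List.foldl_cons, PySem.Set.contains_iff, PySem.Set.mem_ofList, hB,
          List.eraseIdx] using h0
      · rw [if_neg (by simp [hB])]
        have h1 := ih [c]
        simp only [List.singleton_append, List.length_cons, List.length_nil] at h1
        simpa [List.foldl_cons, PySem.Set.contains_iff, PySem.Set.mem_ofList, hB] using h1
    · have hl : 0 < res.length := List.length_pos_iff.mpr hres
      obtain ⟨x, hx⟩ := List.getLast?_isSome.mpr hres |> Option.isSome_iff_exists.mp
      rw [getD_prev res c rest hres, hx]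
      simp only [Option.getD_some]
      by_cases hc : c ∈ B ∨ c = x
      · rw [if_pos (by tauto), erase_mid, ih res, List.foldl_cons]
        have : ¬ (¬ PySem.Set.contains (PySem.Set.ofList B) c = true ∧
            (res = [] ∨ res.getLast? ≠ some c)) := by
          simp only [PySem.Set.contains_iff, PySem.Set.mem_ofList]
          rcases hc with hB | hxc
          · tauto
          · subst hxc
            intro h'
            rcases h'.2 with h2 | h2
            · exact hres h2
            · exact h2 hx
        rw [if_neg this]
      · rw [not_or] at hc
        rw [if_neg (by simp only [hl, true_and]; tauto)]
        have := ih (res ++ [c])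
        simp only [List.append_assoc, List.singleton_append, List.length_append,
          List.length_cons, List.length_nil] at this
        rw [this, List.foldl_cons]
        have hkeep : (¬ PySem.Set.contains (PySem.Set.ofList B) c = true ∧
            (res = [] ∨ res.getLast? ≠ some c)) := by
          simp only [PySem.Set.contains_iff, PySem.Set.mem_ofList]
          refine ⟨by simpa using hc.1, Or.inr ?_⟩
          rw [hx]
          intro h'
          exact hc.2 ((Option.some_inj.mp h').symm) |>.elim
        rw [if_pos hkeep]

-- ===== VERDICT (by name: the statement is the Claim_ definition above) =====
theorem delete_chars_spec : Claim_equal_delete_chars := by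
  intro A B _
  unfold Spec_delete_chars delete_chars delete_chars_alt
  exact congrArg String.mk (by simpa using loop_eq B.toList A.toList [])
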